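-- pv_equiv track=rewrite | github.com/dmiyakawa/atcoder-workspace | abc259/C/main.py | solve
-- ===== SOURCE A (Python) =====
-- def solve(S: str, T: str):
--     si, ti = 0, 0
--     while si < len(S) or ti < len(T):
--         if si == len(S) or ti == len(T):
--             return False
--         ch_s = S[si]
--         ch_t = T[ti]
--         if ch_s != ch_t:
--             return False
--         len_s = 0
--         len_t = 0
--         while si < len(S) and S[si] == ch_s:
--             si += 1
--             len_s += 1
--         while ti < len(T) and T[ti] == ch_t:
--             ti += 1
--             len_t += 1
--         if len_s != len_t and (len_s > len_t or len_s < 2):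
--             return False
--
--     return True
-- ===== SOURCE B (Python) =====
-- def solve(S: str, T: str):
--     while S or T:
--         if not S or not T or S[0] != T[0]:
--             return False
--         c = S[0]
--         s_rest = S.lstrip(c)
--         t_rest = T.lstrip(c)
--         ns = len(S) - len(s_rest)
--         nt = len(T) - len(t_rest)
--         if not (ns == nt or 2 <= ns < nt):
--             return False
--         S, T = s_rest, t_rest
--     return True
-- ===== Notes on version B (the rewrite author's own statement) =====
-- stated objective: simpler
-- what changed: Replaces A's index pointers with hand-counted inner character loops by a loop over shrinking suffix strings: each leading run is peeled with str.lstrip and its length obtained as a length difference, so no indices and no inner loops remain.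
import Mathlib
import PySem

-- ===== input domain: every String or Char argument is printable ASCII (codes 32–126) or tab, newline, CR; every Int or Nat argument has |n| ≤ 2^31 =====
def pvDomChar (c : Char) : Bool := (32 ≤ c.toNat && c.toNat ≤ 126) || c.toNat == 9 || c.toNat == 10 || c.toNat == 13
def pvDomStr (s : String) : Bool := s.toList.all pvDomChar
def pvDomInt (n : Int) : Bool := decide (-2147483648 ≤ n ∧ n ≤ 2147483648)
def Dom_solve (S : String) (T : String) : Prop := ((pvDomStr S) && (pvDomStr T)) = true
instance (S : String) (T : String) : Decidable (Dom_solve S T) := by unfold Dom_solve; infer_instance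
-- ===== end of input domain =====

-- B peels each leading run with lstrip on shrinking suffix strings instead of A's index pointers with inner counting loops; objective: simpler.

-- ===== PORT A =====
-- inner 'while si < len(S) and S[si] == ch_s' loop: returns (run length, remaining suffix)
def runA (c : Char) : List Char → Nat × List Char
  | [] => (0, [])
  | x :: xs =>
    if x = c then ((runA c xs).1 + 1, (runA c xs).2)
    else (0, x :: xs)

theorem runA_snd_le (c : Char) (l : List Char) : (runA c l).2.length ≤ l.length := by
  induction l with
  | nil => simp [runA]
  | cons x xs ih =>
    simp only [runA]
    split
    · simpa using Nat.le_succ_of_le ih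
    · exact Nat.le_refl _

-- the outer while loop of A, over the remaining suffixes of S and T
def loopA : List Char → List Char → Bool
  | [], [] => true
  | [], _ :: _ => false
  | _ :: _, [] => false
  | cs :: s0, ct :: t0 =>
    if cs ≠ ct then false
    else
      let ns := (runA cs (cs :: s0)).1
      let nt := (runA ct (ct :: t0)).1
      if ns ≠ nt ∧ (ns > nt ∨ ns < 2) then false
      else loopA (runA cs (cs :: s0)).2 (runA ct (ct :: t0)).2
termination_by s t => s.length + t.length
decreasing_by
  have hs := runA_snd_le cs s0
  have ht := runA_snd_le ct t0
  simp [runA]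
  omega

def solve (S : String) (T : String) : Bool := loopA S.toList T.toList

-- ===== PORT B =====
-- the while loop of Source B over the shrinking suffixes; lstrip(c) = dropWhile (· == c),
-- run lengths obtained as length differences exactly as Source B computes them
def loopB : List Char → List Char → Bool
  | [], [] => true
  | [], _ :: _ => false
  | _ :: _, [] => false
  | cs :: s0, ct :: t0 =>
    if cs ≠ ct then false
    else
      let ns := (cs :: s0).length - ((cs :: s0).dropWhile (· == cs)).length
      let nt := (ct :: t0).length - ((ct :: t0).dropWhile (· == cs)).length
      if ns = nt ∨ (2 ≤ ns ∧ ns < nt) then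
        loopB ((cs :: s0).dropWhile (· == cs)) ((ct :: t0).dropWhile (· == cs))
      else false
termination_by s t => s.length + t.length
decreasing_by
  have hs : ((cs :: s0).dropWhile (· == cs)).length ≤ s0.length := by
    simp only [List.dropWhile_cons, beq_self_eq_true, if_true]
    exact List.length_dropWhile_le _ _
  have ht : ((ct :: t0).dropWhile (· == cs)).length ≤ t0.length + 1 := by
    simpa using List.length_dropWhile_le (p := (· == cs)) (l := ct :: t0)
  simp only [List.length_cons]
  omega

def solve_alt (S : String) (T : String) : Bool := loopB S.toList T.toList

-- ===== PRECONDITION & SPEC =====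
def Spec_solve (S : String) (T : String) (out : Bool) : Prop := out = solve_alt S T
instance (S : String) (T : String) (out : Bool) : Decidable (Spec_solve S T out) := by unfold Spec_solve; infer_instance

-- ===== CLAIM (what is proved, stated in full; the proofs are below) =====
def Claim_equal_solve : Prop := ∀ (S : String) (T : String), Dom_solve S T → Spec_solve S T (solve S T)

-- ===== LEMMAS AND PROOFS =====

theorem runA_eq (c : Char) (l : List Char) :
    runA c l = ((l.takeWhile (· == c)).length, l.dropWhile (· == c)) := by
  induction l with
  | nil => simp [runA]
  | cons x xs ih =>
    simp only [runA, List.takeWhile_cons, List.dropWhile_cons]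
    by_cases h : x = c
    · simp [h, ih]
    · simp [h]

theorem take_drop_length (c : Char) (l : List Char) :
    (l.takeWhile (· == c)).length + (l.dropWhile (· == c)).length = l.length := by
  rw [← List.length_append, List.takeWhile_append_dropWhile]

theorem loopA_eq_loopB (s t : List Char) : loopA s t = loopB s t := by
  induction hn : s.length + t.length using Nat.strong_induction_on generalizing s t with
  | _ n ih =>
  subst hn
  match s, t with
  | [], [] => rw [loopA.eq_def, loopB.eq_def]
  | [], c :: t0 => rw [loopA.eq_def, loopB.eq_def]
  | c :: s0, [] => rw [loopA.eq_def, loopB.eq_def]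
  | cs :: s0, ct :: t0 =>
    rw [loopA.eq_def, loopB.eq_def]
    by_cases hc : cs = ct
    · subst hc
      simp only [runA_eq, List.dropWhile_cons, List.takeWhile_cons, if_neg (not_not_intro rfl)]
      simp only [beq_self_eq_true, if_true, List.length_cons]
      have hlen_s := take_drop_length cs s0
      have hlen_t := take_drop_length cs t0
      set nsA := (s0.takeWhile (· == cs)).length + 1 with hnsA
      set ntA := (t0.takeWhile (· == cs)).length + 1 with hntA
      set nsB := s0.length + 1 - (s0.dropWhile (· == cs)).length with hnsB
      set ntB := t0.length + 1 - (t0.dropWhile (· == cs)).length with hntB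
      have hns : nsA = nsB := by omega
      have hnt : ntA = ntB := by omega
      have hrec : loopA (s0.dropWhile (· == cs)) (t0.dropWhile (· == cs)) =
          loopB (s0.dropWhile (· == cs)) (t0.dropWhile (· == cs)) := by
        refine ih ((s0.dropWhile (· == cs)).length + (t0.dropWhile (· == cs)).length) ?_ _ _ rfl
        have h1 := List.length_dropWhile_le (p := (· == cs)) (l := s0)
        have h2 := List.length_dropWhile_le (p := (· == cs)) (l := t0)
        simp only [List.length_cons]
        omega
      by_cases hcond : nsA ≠ ntA ∧ (nsA > ntA ∨ nsA < 2)
      · rw [if_pos hcond]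
        rw [if_neg (by omega)]
      · rw [if_neg hcond]
        rw [if_pos (by omega)]
        exact hrec
    · simp [hc]

-- ===== VERDICT (by name: the statement is the Claim_ definition above) =====
theorem solve_spec : Claim_equal_solve := by
  intro S T _
  unfold Spec_solve solve solve_alt
  exact loopA_eq_loopB _ _
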